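-- pv_equiv track=rewrite | github.com/MelleJo/Klantuitvraagtool | .src/services/summarization_service.py | couple_coverage_with_descriptions
-- ===== SOURCE A (Python) =====
-- from typing import List, Dict, Any
--
-- def couple_coverage_with_descriptions(current_coverage: List[str], product_descriptions: Dict[str, Any]) -> List[Dict[str, str]]:
--     enhanced_coverage = []
--     for item in current_coverage:
--         for category, products in product_descriptions.items():
--             for product, details in products.items():
--                 if product.lower() in item.lower():
--                     enhanced_coverage.append({
--                         "coverage": item,
--                         "description": details.get("description", ""),
--                         "title": details.get("title", product)
--                     })
--                     break
--             else:
--                 continue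
--             break
--         else:
--             enhanced_coverage.append({
--                 "coverage": item,
--                 "description": "Geen specifieke productbeschrijving beschikbaar.",
--                 "title": "Onbekende verzekering"
--             })
--     return enhanced_coverage
-- ===== SOURCE B (Python) =====
-- def couple_coverage_with_descriptions(current_coverage, product_descriptions):
--     # Product-major data-flow: stream every product once over a state vector of
--     # all items, filling each still-unmatched slot; no per-item scan, no break.
--     state = [(item.lower(), None) for item in current_coverage]
--     for products in product_descriptions.values():
--         for product, details in products.items():
--             key = product.lower()
--             row = (details.get("description", ""), details.get("title", product))
--             state = [(low, b if b is not None else (row if key in low else None))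
--                      for (low, b) in state]
--     return [
--         {"coverage": item, "description": b[0], "title": b[1]} if b is not None
--         else {"coverage": item,
--               "description": "Geen specifieke productbeschrijving beschikbaar.",
--               "title": "Onbekende verzekering"}
--         for item, (low, b) in zip(current_coverage, state)
--     ]
-- ===== Notes on version B (the rewrite author's own statement) =====
-- stated objective: alternative
-- what changed: B inverts the loop nesting: instead of A's item-major scan over products with a first-match break, B makes a single product-major pass, streaming each product once over a state vector of all items and filling each still-unmatched slot (first product in iteration order still wins because filled slots are never overwritten).
import Mathlib
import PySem

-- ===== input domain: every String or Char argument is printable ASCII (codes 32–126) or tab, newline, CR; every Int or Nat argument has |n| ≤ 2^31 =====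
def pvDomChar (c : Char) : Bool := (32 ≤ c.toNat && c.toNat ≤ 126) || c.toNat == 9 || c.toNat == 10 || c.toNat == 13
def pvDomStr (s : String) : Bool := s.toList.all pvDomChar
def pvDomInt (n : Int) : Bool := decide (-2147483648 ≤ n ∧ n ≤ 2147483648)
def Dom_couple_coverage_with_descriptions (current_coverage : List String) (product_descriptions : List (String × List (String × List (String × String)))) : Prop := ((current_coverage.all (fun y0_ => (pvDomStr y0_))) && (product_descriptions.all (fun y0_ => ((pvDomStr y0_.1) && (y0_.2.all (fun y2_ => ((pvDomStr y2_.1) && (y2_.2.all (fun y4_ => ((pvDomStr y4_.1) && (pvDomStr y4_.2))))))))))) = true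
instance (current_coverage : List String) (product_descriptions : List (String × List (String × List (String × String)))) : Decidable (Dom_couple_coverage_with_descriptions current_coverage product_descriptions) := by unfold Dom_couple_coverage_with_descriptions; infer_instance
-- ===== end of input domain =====

-- B inverts the loop nesting: a single product-major pass streams each product over a state vector of all items, filling still-unmatched slots, instead of A's per-item scan over products with a break.


-- ===== PORT A =====
-- inner 'for product, details in products.items(): … break' loop (some = break with an appended row)
def pvInnerA (item : String) : List (String × List (String × String)) → Option (List (String × String))
  | [] => none
  | (product, details) :: rest =>
    if PySem.Str.isIn (PySem.Str.lower product) (PySem.Str.lower item) then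
      some [("coverage", item),
            ("description", PySem.Dict.getD (PySem.Dict.mk details) "description" ""),
            ("title", PySem.Dict.getD (PySem.Dict.mk details) "title" product)]
    else pvInnerA item rest

-- outer 'for category, products in product_descriptions.items(): … else: …' loop
def pvOuterA (item : String) : List (String × List (String × List (String × String))) → Option (List (String × String))
  | [] => none
  | (_category, products) :: rest =>
    match pvInnerA item products with
    | some row => some row
    | none => pvOuterA item rest

def couple_coverage_with_descriptions (current_coverage : List String) (product_descriptions : List (String × List (String × List (String × String)))) : List (List (String × String)) :=
  current_coverage.foldl
    (fun enhanced_coverage item =>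
      match pvOuterA item product_descriptions with
      | some row => enhanced_coverage ++ [row]
      | none => enhanced_coverage ++
          [[("coverage", item),
            ("description", "Geen specifieke productbeschrijving beschikbaar."),
            ("title", "Onbekende verzekering")]])
    []

-- ===== PORT B =====
-- Source B's list comprehension that streams one product (key, row) over the whole state vector
def pvStepB (st : List (String × Option (String × String))) (key : String) (row : String × String) : List (String × Option (String × String)) :=
  st.map (fun p => (p.1, match p.2 with
    | some r => some r
    | none => if PySem.Str.isIn key p.1 then some row else none))

def couple_coverage_with_descriptions_alt (current_coverage : List String) (product_descriptions : List (String × List (String × List (String × String)))) : List (List (String × String)) :=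
  let init := current_coverage.map (fun item => (PySem.Str.lower item, (none : Option (String × String))))
  let state := product_descriptions.foldl
    (fun st cp => cp.2.foldl
      (fun st pdd =>
        pvStepB st (PySem.Str.lower pdd.1)
          (PySem.Dict.getD (PySem.Dict.mk pdd.2) "description" "",
           PySem.Dict.getD (PySem.Dict.mk pdd.2) "title" pdd.1)) st) init
  (current_coverage.zip state).map (fun q => match q.2.2 with
    | some r => [("coverage", q.1), ("description", r.1), ("title", r.2)]
    | none => [("coverage", q.1),
               ("description", "Geen specifieke productbeschrijving beschikbaar."),
               ("title", "Onbekende verzekering")])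

-- ===== PRECONDITION & SPEC =====
def Spec_couple_coverage_with_descriptions (current_coverage : List String) (product_descriptions : List (String × List (String × List (String × String)))) (out : List (List (String × String))) : Prop := out = couple_coverage_with_descriptions_alt current_coverage product_descriptions
instance (current_coverage : List String) (product_descriptions : List (String × List (String × List (String × String)))) (out : List (List (String × String))) : Decidable (Spec_couple_coverage_with_descriptions current_coverage product_descriptions out) := by unfold Spec_couple_coverage_with_descriptions; infer_instance

-- ===== CLAIM (what is proved, stated in full; the proofs are below) =====
def Claim_equal_couple_coverage_with_descriptions : Prop := ∀ (current_coverage : List String) (product_descriptions : List (String × List (String × List (String × String)))), Dom_couple_coverage_with_descriptions current_coverage product_descriptions → Spec_couple_coverage_with_descriptions current_coverage product_descriptions (couple_coverage_with_descriptions current_coverage product_descriptions)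

-- ===== LEMMAS AND PROOFS =====

-- proof-side view of one product's (key, (description, title)) triple
def pvMk (pdd : String × List (String × String)) : String × String × String :=
  (PySem.Str.lower pdd.1,
   PySem.Dict.getD (PySem.Dict.mk pdd.2) "description" "",
   PySem.Dict.getD (PySem.Dict.mk pdd.2) "title" pdd.1)

-- the flattened triple stream, in iteration order
def pvTriples (product_descriptions : List (String × List (String × List (String × String)))) : List (String × String × String) :=
  product_descriptions.flatMap (fun cp => cp.2.map pvMk)

-- first triple whose key is a substring of low
def pvFind (low : String) : List (String × String × String) → Option (String × String)
  | [] => none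
  | t :: rest => if PySem.Str.isIn t.1 low then some t.2 else pvFind low rest

-- the row both programs emit for an item, given its first match (if any)
def pvRow (pd : List (String × List (String × List (String × String)))) (item : String) : List (String × String) :=
  match pvFind (PySem.Str.lower item) (pvTriples pd) with
  | some dt => [("coverage", item), ("description", dt.1), ("title", dt.2)]
  | none => [("coverage", item),
             ("description", "Geen specifieke productbeschrijving beschikbaar."),
             ("title", "Onbekende verzekering")]

lemma zip_map_self {A B : Type} (l : List A) (g : A → B) :
    l.zip (l.map g) = l.map (fun a => (a, g a)) := by
  induction l with
  | nil => rfl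
  | cons a t ih => simp [ih]

-- B's nested folds equal one fold over the flattened triple stream
lemma foldB_flat (st : List (String × Option (String × String))) (pd : List (String × List (String × List (String × String)))) :
    pd.foldl (fun st cp => cp.2.foldl
      (fun st pdd =>
        pvStepB st (PySem.Str.lower pdd.1)
          (PySem.Dict.getD (PySem.Dict.mk pdd.2) "description" "",
           PySem.Dict.getD (PySem.Dict.mk pdd.2) "title" pdd.1)) st) st
    = (pvTriples pd).foldl (fun st t => pvStepB st t.1 t.2) st := by
  induction pd generalizing st with
  | nil => rfl
  | cons cp rest ih =>
    rw [List.foldl_cons, ih,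
        show pvTriples (cp :: rest) = cp.2.map pvMk ++ pvTriples rest from rfl,
        List.foldl_append, List.foldl_map]
    simp only [pvMk]

-- the fold over the triple stream fills each slot with its first match
lemma foldB_find (ts : List (String × String × String)) (st : List (String × Option (String × String))) :
    ts.foldl (fun st t => pvStepB st t.1 t.2) st
    = st.map (fun p => (p.1, match p.2 with | some r => some r | none => pvFind p.1 ts)) := by
  induction ts generalizing st with
  | nil =>
    rw [List.foldl_nil]
    conv_lhs => rw [← List.map_id st]
    refine List.map_congr_left (fun p _ => ?_)
    cases p with
    | mk a b => cases b <;> rfl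
  | cons t rest ih =>
    rw [List.foldl_cons, ih, pvStepB, List.map_map]
    refine List.map_congr_left (fun p _ => ?_)
    cases hp : p.2 with
    | some r => simp [Function.comp, hp]
    | none =>
      simp only [Function.comp, hp, pvFind]
      split_ifs <;> rfl

-- B equals the per-item first-match map
lemma altB_eq_map (cc : List String) (pd : List (String × List (String × List (String × String)))) :
    couple_coverage_with_descriptions_alt cc pd = cc.map (pvRow pd) := by
  unfold couple_coverage_with_descriptions_alt
  simp only [foldB_flat, foldB_find, List.map_map, zip_map_self]
  refine List.map_congr_left (fun item _ => ?_)
  cases hf : pvFind (PySem.Str.lower item) (pvTriples pd) <;>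
    simp [Function.comp, pvRow, hf]

-- per item, A's break/else scan over one category equals pvFind over its flattened rows
lemma innerA_eq_find (item : String) (products : List (String × List (String × String))) :
    pvInnerA item products =
      (pvFind (PySem.Str.lower item) (products.map pvMk)).map
        (fun dt => [("coverage", item), ("description", dt.1), ("title", dt.2)]) := by
  induction products with
  | nil => rfl
  | cons p rest ih =>
    obtain ⟨product, details⟩ := p
    simp only [pvInnerA, List.map, pvFind, pvMk]
    split_ifs with h
    · rfl
    · exact ih

-- per item, A's nested category/product scan equals pvFind over the whole triple stream
lemma outerA_eq_find (item : String) (pd : List (String × List (String × List (String × String)))) :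
    pvOuterA item pd =
      (pvFind (PySem.Str.lower item) (pvTriples pd)).map
        (fun dt => [("coverage", item), ("description", dt.1), ("title", dt.2)]) := by
  induction pd with
  | cons cp rest ih =>
    simp only [pvOuterA, pvTriples, List.flatMap_cons, innerA_eq_find]
    rw [show pvTriples rest = rest.flatMap _ from rfl] at ih
    induction cp.2 with
    | nil => simpa using ih
    | cons q qs ihq =>
      simp only [List.map_cons, List.cons_append, pvFind]
      split_ifs with h
      · rfl
      · exact ihq
  | nil => rfl

-- A equals the same per-item first-match map
lemma a_eq_map (cc : List String) (pd : List (String × List (String × List (String × String)))) :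
    couple_coverage_with_descriptions cc pd = cc.map (pvRow pd) := by
  unfold couple_coverage_with_descriptions
  have h : ∀ (acc : List (List (String × String))) (item : String),
      (match pvOuterA item pd with
        | some row => acc ++ [row]
        | none => acc ++ [[("coverage", item),
                   ("description", "Geen specifieke productbeschrijving beschikbaar."),
                   ("title", "Onbekende verzekering")]]) = acc ++ [pvRow pd item] := by
    intro acc item
    rw [outerA_eq_find]
    cases hf : pvFind (PySem.Str.lower item) (pvTriples pd) <;> simp [pvRow, hf]
  simp only [h]
  simpa using PySem.List.foldl_append_singleton_eq_map (pvRow pd) cc []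

-- ===== VERDICT (by name: the statement is the Claim_ definition above) =====
theorem couple_coverage_with_descriptions_spec : Claim_equal_couple_coverage_with_descriptions := by
  intro cc pd _
  unfold Spec_couple_coverage_with_descriptions
  rw [a_eq_map, altB_eq_map]
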